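-- pv_equiv track=rewrite | github.com/HydraIsProgramming/Cp104-Laurier | Assignments /sand0301_a08/src/functions.py | check_isbn
-- ===== SOURCE A (Python) =====
-- def check_isbn(isbn):
--     """
--     -------------------------------------------------------
--     Determines if an ISBN string is valid. An ISBN string is valid if:
--         - it consists of only digits and dashes ('-')
--         - it contains 5 groups of digits separated by dashes
--         - its first group of digits is either '978' or '979'
--         - its final group of digits is a single digit
--         - its entire length is 17 characters
--     Use: valid = check_isbn(isbn)
--     -------------------------------------------------------
--     Parameters:
--         isbn - a string (str)
--     Returns:
--         valid - True if isbn is valid, False otherwise (boolean)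
--     -------------------------------------------------------
--     """
--     i = 0
--     if (len(isbn) < 18) and (isbn[-2] == '-') and (isbn.count("-") == 4):
--         while i < len(isbn):
--
--             if isbn[i].isdigit() or isbn[i] == "-":
--                 if isbn[i - 1] == '-' and isbn[i] == '-':
--                     valid = False
--                     break
--
--                 else:
--                     if isbn[0:3].isdigit():
--                         if (int(isbn[0:3]) == 979) or (int(isbn[0:3]) == 978):
--                             valid = True
--
--                         else:
--                             valid = False
--                             break
--                     else:
--                         valid = False
--                         break
--             else:
--                 valid = False
--                 break
--
--             i += 1
--     else:
--         valid = False
--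
--     return valid
-- ===== SOURCE B (Python) =====
-- def check_isbn(isbn):
--     if len(isbn) >= 18 or isbn[-2] != '-' or isbn.count('-') != 4:
--         return False
--     return all(g.isdigit() for g in isbn.split('-')) and isbn[0:3] in ('978', '979')
-- ===== Notes on version B (the rewrite author's own statement) =====
-- stated objective: idiomatic
-- what changed: Replaces the indexed while-loop (per-character digit/dash and wraparound adjacent-dash checks, with the 3-char prefix re-parsed by int() on every iteration) by one split('-') whose groups are checked with all(g.isdigit()) plus a single prefix membership test.
import Mathlib
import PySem

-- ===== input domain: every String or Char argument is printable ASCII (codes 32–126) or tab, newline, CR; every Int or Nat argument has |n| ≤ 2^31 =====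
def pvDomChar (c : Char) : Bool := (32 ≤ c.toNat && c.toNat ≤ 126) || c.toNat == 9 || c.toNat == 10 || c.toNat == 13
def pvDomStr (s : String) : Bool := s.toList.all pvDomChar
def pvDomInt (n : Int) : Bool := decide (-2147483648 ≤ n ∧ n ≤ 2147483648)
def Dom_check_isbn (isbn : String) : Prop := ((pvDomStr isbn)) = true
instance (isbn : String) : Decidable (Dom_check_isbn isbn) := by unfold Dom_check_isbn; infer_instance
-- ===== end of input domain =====

-- B replaces A's indexed while-loop (per-char digit/dash + wraparound adjacent-dash checks, prefix
-- re-parsed with int() every iteration) by a single split('-') with all-groups-digit plus one prefix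
-- membership test (idiomatic; same cost).

-- ===== PORT A =====
-- A's while-loop: i runs over the indices; `isbn[i-1]` uses Python's negative-index wraparound,
-- ported with pyGet?.  Every index the loop reads is in range on an admitted input, so the
-- `.getD ' '` default is never the value taken there.
def check_isbn_loop (s : List Char) (i : Nat) : Bool :=
  if h : i < s.length then
    if PySem.Chars.isdigit s[i] || s[i] == '-' then
      if ((PySem.List.pyGet? s ((i : Int) - 1)).getD ' ' == '-') && (s[i] == '-') then
        false                                   -- valid = False; break
      else
        if PySem.Chars.strIsdigit (PySem.List.slice s (some 0) (some 3)) then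
          if ((PySem.Int.ofChars? (PySem.List.slice s (some 0) (some 3))).getD 0 == 979)
             || ((PySem.Int.ofChars? (PySem.List.slice s (some 0) (some 3))).getD 0 == 978) then
            check_isbn_loop s (i + 1)           -- valid = True; i += 1
          else false
        else false
    else false
  else true                                     -- loop exhausted: last assignment was valid = True
termination_by s.length - i

-- Python raises IndexError at `isbn[-2]` when len < 2 (pyGet? = none there, excluded by Pre_);
-- the port's `.getD ' '` branch then just returns false.
def check_isbn (isbn : String) : Bool :=
  let s := isbn.toList
  if decide (PySem.Chars.len s < 18) && ((PySem.List.pyGet? s (-2)).getD ' ' == '-')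
     && (PySem.Chars.count s ['-'] == 4) then
    check_isbn_loop s 0
  else false

-- ===== PORT B =====
def check_isbn_alt (isbn : String) : Bool :=
  let s := isbn.toList
  if decide (18 ≤ PySem.Chars.len s) || !((PySem.List.pyGet? s (-2)).getD ' ' == '-')
     || !(PySem.Chars.count s ['-'] == 4) then
    false
  else
    (PySem.Chars.splitOn s ['-']).all PySem.Chars.strIsdigit
      && [['9','7','8'], ['9','7','9']].contains (PySem.List.slice s (some 0) (some 3))

-- ===== PRECONDITION & SPEC =====
-- Pre_ excludes only strings shorter than 2 characters, on which Python's A (and B) raise IndexError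
-- when reading the second-to-last character.
def Pre_check_isbn (isbn : String) : Prop := 2 ≤ isbn.toList.length
instance (isbn : String) : Decidable (Pre_check_isbn isbn) := by unfold Pre_check_isbn; infer_instance
def pvWitness_check_isbn : String := "978-0-13-468599-1"

def Spec_check_isbn (isbn : String) (out : Bool) : Prop := out = check_isbn_alt isbn
instance (isbn : String) (out : Bool) : Decidable (Spec_check_isbn isbn out) := by unfold Spec_check_isbn; infer_instance

-- ===== CLAIM (what is proved, stated in full; the proofs are below) =====
def Claim_equal_check_isbn : Prop := ∀ (isbn : String), Dom_check_isbn isbn → Pre_check_isbn isbn → Spec_check_isbn isbn (check_isbn isbn)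

-- ===== LEMMAS AND PROOFS =====

-- The scan A's loop performs, made structural: pd = "previous character (with wraparound) was a dash".
def pvScan (pd : Bool) : List Char → Bool
  | [] => true
  | c :: r => (PySem.Chars.isdigit c || c == '-') && !(pd && c == '-') && pvScan (c == '-') r

-- The scan B's split-and-check amounts to: pd = "current group is empty so far".
def pvScanB (pd : Bool) : List Char → Bool
  | [] => !pd
  | c :: r => if c == '-' then !pd && pvScanB true r else PySem.Chars.isdigit c && pvScanB false r

-- Clean recursion computing splitOn's single-dash split (cur = current group, reversed).
def pvSplit : List Char → List Char → List (List Char)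
  | [], cur => [cur.reverse]
  | c :: r, cur => if c == '-' then cur.reverse :: pvSplit r [] else pvSplit r (c :: cur)

-- "The last character is a dash" (of the empty list: pd).
def pvDashEnd (pd : Bool) (l : List Char) : Bool :=
  match l.getLast? with | some c => c == '-' | none => pd

-- A's 3-char-prefix test, as both branch conditions of the loop body combined.
def pvPrefixA (s : List Char) : Bool :=
  PySem.Chars.strIsdigit (PySem.List.slice s (some 0) (some 3))
    && (((PySem.Int.ofChars? (PySem.List.slice s (some 0) (some 3))).getD 0 == 979)
        || ((PySem.Int.ofChars? (PySem.List.slice s (some 0) (some 3))).getD 0 == 978))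

theorem pvSplitOn_go_eq (fuel : Nat) : ∀ (l cur : List Char) (acc : List (List Char)),
    l.length ≤ fuel →
    PySem.Chars.splitOn.go ['-'] fuel l cur acc = acc.reverse ++ pvSplit l cur := by
  induction fuel with
  | zero =>
    intro l cur acc h
    have : l = [] := List.eq_nil_of_length_eq_zero (Nat.le_zero.mp h)
    subst this
    simp [PySem.Chars.splitOn.go, pvSplit]
  | succ n ih =>
    intro l cur acc h
    cases l with
    | nil => simp [PySem.Chars.splitOn.go, pvSplit]
    | cons c rest =>
      simp only [PySem.Chars.splitOn.go, pvSplit]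
      by_cases hc : c = '-'
      · subst hc
        simp only [List.isPrefixOf, beq_self_eq_true, Bool.true_and, if_pos]
        rw [ih]
        · simp
        · simpa using Nat.le_of_succ_le_succ h
      · have : List.isPrefixOf ['-'] (c :: rest) = false := by
          simp [List.isPrefixOf]; exact fun hh => absurd hh.symm hc
        rw [if_neg (by simp [this]), if_neg (by simp [hc]), ih]
        simpa using Nat.le_of_succ_le_succ h

theorem pvSplitOn_eq (s : List Char) : PySem.Chars.splitOn s ['-'] = pvSplit s [] := by
  rw [PySem.Chars.splitOn, pvSplitOn_go_eq (s.length + 1) s [] [] (by omega)]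
  rfl

theorem pvSplit_all (l : List Char) : ∀ cur,
    (pvSplit l cur).all PySem.Chars.strIsdigit
      = (cur.all PySem.Chars.isdigit && pvScanB cur.isEmpty l) := by
  induction l with
  | nil =>
    intro cur
    cases cur <;>
      simp [pvSplit, pvScanB, PySem.Chars.strIsdigit, List.all_reverse, Bool.and_comm]
  | cons c r ih =>
    intro cur
    by_cases hc : c = '-'
    · subst hc
      simp only [pvSplit, pvScanB, if_pos rfl, List.all_cons, ih]
      simp [PySem.Chars.strIsdigit, List.all_reverse, ih]
      cases cur <;> simp [Bool.and_comm, Bool.and_left_comm]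
    · simp only [pvSplit, pvScanB, if_neg hc, ih, List.all_cons]
      cases cur <;> simp [hc, ih] <;> simp [Bool.and_comm, Bool.and_left_comm, Bool.and_assoc]

theorem pvScanB_eq (l : List Char) : ∀ pd,
    pvScanB pd l = (pvScan pd l && !(pvDashEnd pd l)) := by
  induction l with
  | nil => intro pd; simp [pvScanB, pvScan, pvDashEnd]
  | cons c r ih =>
    intro pd
    cases r with
    | nil =>
      by_cases hc : c = '-'
      · subst hc; simp [pvScanB, pvScan, pvDashEnd]
      · have hc' : (c == '-') = false := by simp [hc]
        simp [pvScanB, pvScan, pvDashEnd, hc, hc']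
    | cons d t =>
      have hde : pvDashEnd pd (c :: d :: t) = pvDashEnd (c == '-') (d :: t) := by
        simp only [pvDashEnd, List.getLast?_cons_cons]
        cases h : (d :: t).getLast? with
        | some v => rfl
        | none => simp at h
      rw [hde]
      by_cases hc : c = '-'
      · subst hc
        have h1 : pvScanB pd ('-' :: d :: t) = (!pd && pvScanB true (d :: t)) := by
          rw [pvScanB]; simp
        rw [h1, ih]
        simp only [pvScan]
        have hdig : PySem.Chars.isdigit '-' = false := by decide
        simp [hdig]
        cases pd <;> cases h : pvScan true (d :: t) <;>
          cases pvDashEnd true (d :: t) <;> simp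
      · have hc' : (c == '-') = false := by simp [hc]
        have h1 : pvScanB pd (c :: d :: t) = (PySem.Chars.isdigit c && pvScanB false (d :: t)) := by
          rw [pvScanB]; simp [hc']
        rw [h1, ih]
        simp only [pvScan]
        simp [hc']
        cases PySem.Chars.isdigit c <;>
          cases pvScan false (d :: t) <;> simp

theorem pvScan_head (pd pd' : Bool) (c : Char) (r : List Char) (h : c ≠ '-') :
    pvScan pd (c :: r) = pvScan pd' (c :: r) := by
  have hc' : (c == '-') = false := by simp [h]
  simp [pvScan, hc']

theorem pvScan_infix (l : List Char) : ∀ pd, ['-','-'] <:+: l → pvScan pd l = false := by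
  induction l with
  | nil => intro pd h; simp at h
  | cons c r ih =>
    intro pd h
    rcases (List.infix_cons_iff.mp h) with hpre | hinf
    · rcases hpre with ⟨t, ht⟩
      obtain ⟨h1, h2⟩ := List.cons.inj ht
      subst h1
      rw [show r = '-' :: t from h2.symm]
      rw [pvScan, pvScan]
      simp
    · simp [pvScan, ih _ hinf]

theorem pvGet_nat (s : List Char) (i : Nat) (h : i < s.length) :
    PySem.List.pyGet? s (i : Int) = some s[i] := by
  simp [PySem.List.pyGet?, PySem.List.pyIdx?, h]

theorem pvGet_neg (s : List Char) (j : Nat) (h1 : 1 ≤ j) (h2 : j ≤ s.length) :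
    PySem.List.pyGet? s (-(j : Int)) = some s[s.length - j] := by
  have hlt : s.length - j < s.length := by omega
  simp only [PySem.List.pyGet?, PySem.List.pyIdx?]
  rw [if_neg (by omega), if_pos (by omega)]
  simp only [Option.bind_some]
  rw [show (-(-(j : Int))).toNat = j by omega]
  exact List.getElem?_eq_getElem hlt

theorem pvLoop_eq_scan (s : List Char) : ∀ (k i : Nat), s.length - i = k → i < s.length →
    check_isbn_loop s i
      = (pvPrefixA s && pvScan ((PySem.List.pyGet? s ((i : Int) - 1)).getD ' ' == '-') (s.drop i)) := by
  intro k
  induction k with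
  | zero => intro i hk hi; omega
  | succ k ih =>
    intro i hk hi
    have hdrop : s.drop i = s[i] :: s.drop (i + 1) := List.drop_eq_getElem_cons hi
    rw [check_isbn_loop, dif_pos hi, hdrop, pvScan]
    by_cases h1 : (PySem.Chars.isdigit s[i] || s[i] == '-') = true
    · rw [if_pos h1, h1]
      by_cases h2 : (((PySem.List.pyGet? s ((i : Int) - 1)).getD ' ' == '-') && (s[i] == '-')) = true
      · rw [if_pos h2, h2]; simp
      · rw [if_neg h2]
        rw [Bool.not_eq_true] at h2
        by_cases h3 : PySem.Chars.strIsdigit (PySem.List.slice s (some 0) (some 3)) = true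
        · rw [if_pos h3]
          by_cases h4 : (((PySem.Int.ofChars? (PySem.List.slice s (some 0) (some 3))).getD 0 == 979)
             || ((PySem.Int.ofChars? (PySem.List.slice s (some 0) (some 3))).getD 0 == 978)) = true
          · rw [if_pos h4]
            have hpre : pvPrefixA s = true := by unfold pvPrefixA; rw [h3, h4]; rfl
            rcases Nat.lt_or_ge (i + 1) s.length with hlt | hge
            · rw [ih (i + 1) (by omega) hlt]
              have hcast : ((↑(i + 1) : Int) - 1) = (i : Int) := by push_cast; ring
              rw [hcast, pvGet_nat s i hi]
              rw [hpre, h2]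
              simp
            · rw [check_isbn_loop, dif_neg (by omega)]
              rw [List.drop_eq_nil_of_le hge]
              rw [hpre, h2]
              simp [pvScan]
          · rw [if_neg h4]
            rw [Bool.not_eq_true] at h4
            have hpre : pvPrefixA s = false := by unfold pvPrefixA; rw [h4]; simp
            rw [hpre]; simp
        · rw [if_neg h3]
          rw [Bool.not_eq_true] at h3
          have hpre : pvPrefixA s = false := by unfold pvPrefixA; rw [h3]; simp
          rw [hpre]; simp
    · rw [if_neg h1]
      rw [Bool.not_eq_true] at h1
      rw [h1]; simp

theorem pvSlice03 (s : List Char) : PySem.List.slice s (some 0) (some 3) = s.take 3 := by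
  simp [PySem.List.slice, PySem.List.clampIdx]

theorem pvDigitMem (c : Char) (h : PySem.Chars.isdigit c = true) :
    c ∈ ['0','1','2','3','4','5','6','7','8','9'] := by
  rw [PySem.Chars.isdigit, Bool.and_eq_true, decide_eq_true_iff, decide_eq_true_iff] at h
  obtain ⟨h0, h9⟩ := h
  rw [Char.le_def] at h0 h9
  have h0' : 48 ≤ c.toNat := h0
  have h9' : c.toNat ≤ 57 := h9
  have hc : c = Char.ofNat c.toNat := (Char.ofNat_toNat c).symm
  interval_cases h : c.toNat <;> rw [hc] <;> decide

set_option maxRecDepth 100000 in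
theorem pvDig2all : (['0','1','2','3','4','5','6','7','8','9'].all fun a =>
    ['0','1','2','3','4','5','6','7','8','9'].all fun b =>
    ((((PySem.Int.ofChars? [a,b]).getD 0 == 979) || ((PySem.Int.ofChars? [a,b]).getD 0 == 978))
      == false)) = true := by
  decide

set_option maxRecDepth 100000 in
theorem pvDig3all : (['0','1','2','3','4','5','6','7','8','9'].all fun a =>
    ['0','1','2','3','4','5','6','7','8','9'].all fun b =>
    ['0','1','2','3','4','5','6','7','8','9'].all fun c =>
    ((((PySem.Int.ofChars? [a,b,c]).getD 0 == 979) || ((PySem.Int.ofChars? [a,b,c]).getD 0 == 978))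
      == ([['9','7','8'],['9','7','9']].contains [a,b,c]))) = true := by
  decide

theorem pvPrefix_eq (s : List Char) (h : 2 ≤ s.length) :
    pvPrefixA s = [['9','7','8'], ['9','7','9']].contains (PySem.List.slice s (some 0) (some 3)) := by
  match s, h with
  | a :: b :: rest, _ =>
    unfold pvPrefixA
    rw [pvSlice03]
    cases rest with
    | nil =>
      by_cases hd : (PySem.Chars.isdigit a && PySem.Chars.isdigit b) = true
      · obtain ⟨ha, hb⟩ : PySem.Chars.isdigit a = true ∧ PySem.Chars.isdigit b = true := by
          simpa using hd
        have h2 := pvDig2all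
        simp only [List.all_eq_true, beq_iff_eq] at h2
        have := h2 a (pvDigitMem a ha) b (pvDigitMem b hb)
        simp only [List.take, this]
        simp
      · have hsd : PySem.Chars.strIsdigit [a, b] = false := by
          rw [PySem.Chars.strIsdigit]
          rw [Bool.not_eq_true] at hd
          simp only [Bool.and_eq_false_iff] at hd ⊢
          simp only [List.all_cons, List.all_nil, Bool.and_true]
          rcases hd with hd | hd <;> simp [hd]
        simp only [List.take, hsd]
        simp
    | cons c rest' =>
      by_cases hd : (PySem.Chars.isdigit a && (PySem.Chars.isdigit b && PySem.Chars.isdigit c)) = true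
      · obtain ⟨ha, hb, hc⟩ : PySem.Chars.isdigit a = true ∧ PySem.Chars.isdigit b = true ∧ PySem.Chars.isdigit c = true := by
          simpa using hd
        have h3 := pvDig3all
        simp only [List.all_eq_true, beq_iff_eq] at h3
        have heq := h3 a (pvDigitMem a ha) b (pvDigitMem b hb) c (pvDigitMem c hc)
        have hsd : PySem.Chars.strIsdigit [a, b, c] = true := by
          rw [PySem.Chars.strIsdigit]; simp [ha, hb, hc]
        simp only [List.take, heq, hsd]
        simp
      · have hsd : PySem.Chars.strIsdigit [a, b, c] = false := by
          rw [PySem.Chars.strIsdigit]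
          rw [Bool.not_eq_true] at hd
          simp only [Bool.and_eq_false_iff] at hd
          simp only [List.all_cons, List.all_nil, Bool.and_true]
          rcases hd with hd | hd | hd <;> simp [hd]
        have hmem : ([['9','7','8'], ['9','7','9']].contains [a, b, c]) = false := by
          by_cases hm : [a, b, c] ∈ [[('9':Char),'7','8'], ['9','7','9']]
          · simp only [List.mem_cons, List.not_mem_nil, or_false] at hm
            rcases hm with hm | hm
            · obtain ⟨e1, e2, e3⟩ : a = '9' ∧ b = '7' ∧ c = '8' := by
                simpa using hm
              subst e1; subst e2; subst e3
              simp at hd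
              exact absurd hd (by decide)
            · obtain ⟨e1, e2, e3⟩ : a = '9' ∧ b = '7' ∧ c = '9' := by
                simpa using hm
              subst e1; subst e2; subst e3
              simp at hd
              exact absurd hd (by decide)
          · simpa using hm
        simp only [List.take, hsd, hmem]
        simp

theorem pvPrefix_head (s : List Char) (h : 2 ≤ s.length) (hp : pvPrefixA s = true) :
    ∃ r, s = '9' :: r := by
  rw [pvPrefix_eq s h, pvSlice03] at hp
  match s with
  | a :: t =>
    refine ⟨t, ?_⟩
    have : a :: t.take 2 ∈ [[('9':Char),'7','8'], ['9','7','9']] := by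
      have := hp
      simp only [List.take] at this ⊢
      simpa using this
    simp only [List.mem_cons, List.not_mem_nil, or_false] at this
    rcases this with hm | hm <;>
      · obtain ⟨e1, _⟩ := List.cons.inj hm
        rw [e1]

-- ===== VERDICT (by name: the statement is the Claim_ definition above) =====
theorem check_isbn_spec : Claim_equal_check_isbn := by
  intro isbn _ hpre
  unfold Spec_check_isbn check_isbn check_isbn_alt
  set s := isbn.toList with hs
  by_cases hG : (decide (PySem.Chars.len s < 18) && ((PySem.List.pyGet? s (-2)).getD ' ' == '-')
     && (PySem.Chars.count s ['-'] == 4)) = true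
  · obtain ⟨⟨hG1, hG2⟩, hG3⟩ :
        (decide (PySem.Chars.len s < 18) = true ∧ ((PySem.List.pyGet? s (-2)).getD ' ' == '-') = true)
          ∧ (PySem.Chars.count s ['-'] == 4) = true := by
      simpa using hG
    have hlen2 : 2 ≤ s.length := hpre
    have hget2 : PySem.List.pyGet? s (-2) = some s[s.length - 2] :=
      pvGet_neg s 2 (by omega) hlen2
    have hsnd : s[s.length - 2] = '-' := by
      rw [hget2] at hG2; simpa using hG2
    have hn0 : 0 < s.length := by omega
    have hBc : (decide (18 ≤ PySem.Chars.len s) || !((PySem.List.pyGet? s (-2)).getD ' ' == '-')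
       || !(PySem.Chars.count s ['-'] == 4)) = false := by
      have h18 : s.length < 18 := by simpa using hG1
      simp [hG2, hG3, h18]
    rw [if_pos hG, if_neg (by rw [hBc]; simp)]
    -- A side: the loop is the structural scan started with the wrapped-around previous char
    rw [pvLoop_eq_scan s (s.length - 0) 0 rfl hn0]
    have hget1 : PySem.List.pyGet? s ((↑(0 : Nat) : Int) - 1) = some s[s.length - 1] := by
      rw [show ((↑(0 : Nat) : Int) - 1) = -((1 : Nat) : Int) by norm_num]
      exact pvGet_neg s 1 (by omega) (by omega)
    rw [List.drop_zero, hget1]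
    -- B side: splitOn + all is the structural scanB
    rw [pvSplitOn_eq, pvSplit_all s [], pvScanB_eq]
    rw [← pvPrefix_eq s hlen2]
    have hdend : pvDashEnd true s = (s[s.length - 1] == '-') := by
      rw [pvDashEnd]
      have : s.getLast? = some s[s.length - 1] := by
        rw [List.getLast?_eq_getElem?, List.getElem?_eq_getElem (by omega)]
      rw [this]
    simp only [Option.getD_some, List.all_nil, List.isEmpty_nil, Bool.true_and, hdend]
    by_cases hlast : s[s.length - 1] = '-'
    · -- trailing dash: both scans are false, since "--" ends the string
      have hsuf : ['-','-'] <:+: s := by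
        have hd2 : s.drop (s.length - 2) = ['-','-'] := by
          rw [List.drop_eq_getElem_cons (show s.length - 2 < s.length by omega)]
          rw [show s.length - 2 + 1 = s.length - 1 by omega]
          rw [List.drop_eq_getElem_cons (show s.length - 1 < s.length by omega)]
          rw [show s.length - 1 + 1 = s.length by omega, List.drop_length]
          rw [hsnd, hlast]
        rw [← hd2]
        exact (List.drop_suffix _ _).isInfix
      rw [pvScan_infix s _ hsuf, pvScan_infix s true hsuf]
      simp
    · have hl' : (s[s.length - 1] == '-') = false := by simp [hlast]
      rw [hl']
      by_cases hp : pvPrefixA s = true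
      · obtain ⟨r, hr⟩ := pvPrefix_head s hlen2 hp
        have hscan : pvScan false s = pvScan true s := by
          rw [hr]; exact pvScan_head false true '9' r (by decide)
        rw [hscan, hp]
        simp [Bool.and_comm]
      · rw [Bool.not_eq_true] at hp
        rw [hp]
        simp
  · rw [Bool.not_eq_true] at hG
    have hBc : (decide (18 ≤ PySem.Chars.len s) || !((PySem.List.pyGet? s (-2)).getD ' ' == '-')
       || !(PySem.Chars.count s ['-'] == 4)) = true := by
      rcases Bool.and_eq_false_iff.mp hG with h | h
      · rcases Bool.and_eq_false_iff.mp h with h' | h'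
        · have h18 : 18 ≤ s.length := by simpa using h'
          simp [h18]
        · simp [h']
      · simp [h]
    rw [if_neg (by rw [hG]; simp), if_pos hBc]
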